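-- pv_equiv track=rewrite | github.com/bryanlusse/aoc | day15/solution2.py | do_box_logic
-- ===== SOURCE A (Python) =====
-- from typing import Dict
--
-- def do_box_logic(boxes: Dict, box: int, orig_string: str, split_string: str) -> None:
--     """Do the box logic"""
--     if "-" in orig_string:
--         if box not in boxes.keys():
--             pass
--         else:
--             existing_list = boxes[box]
--             filtered_list = [string for string in existing_list if string.split("=")[0] != split_string[0]]
--             boxes[box] = filtered_list
--     else:
--         if box not in boxes.keys():
--             boxes[box] = []
--         existing_list = boxes[box]
--         contains_substring = any(split_string[0] == string.split("=")[0] for string in existing_list)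
--
--         if contains_substring:
--             updated_list = [
--                 orig_string if split_string[0] == string.split("=")[0] else string for string in existing_list
--             ]
--             boxes[box] = updated_list
--         else:
--             existing_list.append(orig_string)
--             boxes[box] = existing_list
--     return boxes
-- ===== SOURCE B (Python) =====
-- def do_box_logic(boxes, box, orig_string, split_string):
--     """Do the box logic: single fused pass in the add branch (replace-or-append
--     with a found flag) instead of a membership scan followed by a rebuild."""
--     if "-" in orig_string:
--         if box in boxes:
--             boxes[box] = [s for s in boxes[box] if s.split("=")[0] != split_string[0]]
--     else:
--         new_list = []
--         found = False
--         for s in boxes.get(box, []):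
--             if s.split("=")[0] == split_string[0]:
--                 new_list.append(orig_string)
--                 found = True
--             else:
--                 new_list.append(s)
--         if not found:
--             new_list.append(orig_string)
--         boxes[box] = new_list
--     return boxes
-- ===== Notes on version B (the rewrite author's own statement) =====
-- stated objective: alternative
-- what changed: The add branch's two passes over the box list (an any() membership scan, then a rebuilding comprehension or an append) are fused into one explicit loop that replaces every matching lens while setting a found flag, appending once after the loop when no match was seen.
import Mathlib
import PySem

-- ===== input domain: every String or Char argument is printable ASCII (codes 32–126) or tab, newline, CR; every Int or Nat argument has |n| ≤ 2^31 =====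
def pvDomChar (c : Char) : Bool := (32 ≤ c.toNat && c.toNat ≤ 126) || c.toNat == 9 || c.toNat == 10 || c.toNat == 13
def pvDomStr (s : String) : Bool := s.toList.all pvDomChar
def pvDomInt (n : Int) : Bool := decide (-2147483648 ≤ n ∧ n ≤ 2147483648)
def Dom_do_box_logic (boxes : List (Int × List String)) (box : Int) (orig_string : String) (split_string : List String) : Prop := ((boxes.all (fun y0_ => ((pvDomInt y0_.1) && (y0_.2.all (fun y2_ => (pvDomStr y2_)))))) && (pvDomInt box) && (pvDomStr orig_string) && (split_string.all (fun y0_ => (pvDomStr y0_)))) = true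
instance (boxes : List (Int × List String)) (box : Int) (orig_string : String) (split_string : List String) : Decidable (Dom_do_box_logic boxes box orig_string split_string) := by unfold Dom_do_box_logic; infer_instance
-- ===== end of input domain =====

-- B fuses the add branch's membership scan + rebuilding comprehension into one replace-or-append
-- pass with a found flag (objective: alternative). A mutates the dict in place; the equivalence
-- proved here is about the RETURN value (B performs the same mutation).

-- ===== PORT A =====
-- s.split("=")[0]  (split with a nonempty separator always yields a nonempty list, so [0] is safe)
def pvLabel (s : String) : String :=
  (PySem.List.pyGet? ((PySem.Str.split? s "=").getD []) 0).getD ""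

def do_box_logic (boxes : List (Int × List String)) (box : Int) (orig_string : String) (split_string : List String) : List (Int × List String) :=
  let d := PySem.Dict.mk boxes
  -- split_string[0]; Python evaluates it lazily inside any()/the comprehensions, so it only
  -- raises when the scanned list is nonempty — Pre_ excludes exactly that (then .getD is exact).
  let lbl := (PySem.List.pyGet? split_string 0).getD ""
  if PySem.Str.isIn "-" orig_string then
    if d.contains box = false then d.items
    else
      let existing := d.getD box []
      let filtered := existing.filter (fun s => !(pvLabel s == lbl))
      (d.insert box filtered).items
  else
    let d1 := if d.contains box = false then d.insert box [] else d
    let existing := d1.getD box []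
    let contains_substring := existing.any (fun s => lbl == pvLabel s)
    if contains_substring then
      let updated := existing.map (fun s => if lbl == pvLabel s then orig_string else s)
      (d1.insert box updated).items
    else
      (d1.insert box (existing ++ [orig_string])).items

-- ===== PORT B =====
def do_box_logic_alt (boxes : List (Int × List String)) (box : Int) (orig_string : String) (split_string : List String) : List (Int × List String) :=
  let d := PySem.Dict.mk boxes
  if PySem.Str.isIn "-" orig_string then
    if d.contains box then
      (d.insert box ((d.getD box []).filter
        (fun s => !(pvLabel s == (PySem.List.pyGet? split_string 0).getD "")))).items
    else d.items
  else
    let r := (d.getD box []).foldl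
      (fun (acc : List String × Bool) s =>
        if pvLabel s == (PySem.List.pyGet? split_string 0).getD "" then (acc.1 ++ [orig_string], true)
        else (acc.1 ++ [s], acc.2)) ([], false)
    let nl := if r.2 then r.1 else r.1 ++ [orig_string]
    (d.insert box nl).items

-- ===== PRECONDITION & SPEC =====
-- Pre_ excludes exactly the inputs where Python A raises IndexError: split_string empty while
-- the box's existing list is nonempty (split_string[0] is then evaluated).
def Pre_do_box_logic (boxes : List (Int × List String)) (box : Int) (orig_string : String) (split_string : List String) : Prop :=
  split_string ≠ [] ∨ (PySem.Dict.mk boxes).getD box [] = []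
instance (boxes : List (Int × List String)) (box : Int) (orig_string : String) (split_string : List String) : Decidable (Pre_do_box_logic boxes box orig_string split_string) := by unfold Pre_do_box_logic; infer_instance

def pvWitness_do_box_logic : (List (Int × List String)) × Int × String × List String :=
  ([(0, ["a=1", "b=2"])], 0, "a=9", ["a"])

def Spec_do_box_logic (boxes : List (Int × List String)) (box : Int) (orig_string : String) (split_string : List String) (out : List (Int × List String)) : Prop := out = do_box_logic_alt boxes box orig_string split_string
instance (boxes : List (Int × List String)) (box : Int) (orig_string : String) (split_string : List String) (out : List (Int × List String)) : Decidable (Spec_do_box_logic boxes box orig_string split_string out) := by unfold Spec_do_box_logic; infer_instance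

-- ===== CLAIM (what is proved, stated in full; the proofs are below) =====
def Claim_equal_do_box_logic : Prop := ∀ (boxes : List (Int × List String)) (box : Int) (orig_string : String) (split_string : List String), Dom_do_box_logic boxes box orig_string split_string → Pre_do_box_logic boxes box orig_string split_string → Spec_do_box_logic boxes box orig_string split_string (do_box_logic boxes box orig_string split_string)

-- ===== LEMMAS AND PROOFS =====

-- B's fused loop computes the replaced list together with the membership flag
theorem pv_foldl_loop (p : String → Bool) (orig : String) :
    ∀ (xs : List String) (acc : List String) (b : Bool),
      xs.foldl (fun (acc : List String × Bool) s =>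
          if p s then (acc.1 ++ [orig], true) else (acc.1 ++ [s], acc.2)) (acc, b)
        = (acc ++ xs.map (fun s => if p s then orig else s), b || xs.any p) := by
  intro xs
  induction xs with
  | nil => simp
  | cons x xs ih =>
    intro acc b
    by_cases h : p x = true <;> simp [h, ih, List.append_assoc]

-- when no element matches, the replacing map is the identity
theorem pv_map_id_of_not_any (p : String → Bool) (orig : String) (xs : List String)
    (h : xs.any p = false) :
    xs.map (fun s => if p s then orig else s) = xs := by
  induction xs with
  | nil => rfl
  | cons x xs ih =>
    simp only [List.any_cons, Bool.or_eq_false_iff] at h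
    simp [h.1, ih h.2]

-- A's add branch (pre-insert + any() + map/append) equals B's fused loop
set_option maxRecDepth 8192 in
theorem pv_add_branch (d : PySem.Dict Int (List String)) (box : Int) (orig_string lbl : String) :
    (let d1 := if d.contains box = false then d.insert box [] else d
     let existing := d1.getD box []
     let contains_substring := existing.any (fun s => lbl == pvLabel s)
     if contains_substring then
       let updated := existing.map (fun s => if lbl == pvLabel s then orig_string else s)
       (d1.insert box updated).items
     else
       (d1.insert box (existing ++ [orig_string])).items) =
    (let r := (d.getD box []).foldl
      (fun (acc : List String × Bool) s =>
        if pvLabel s == lbl then (acc.1 ++ [orig_string], true)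
        else (acc.1 ++ [s], acc.2)) ([], false)
     let nl := if r.2 then r.1 else r.1 ++ [orig_string]
     (d.insert box nl).items) := by
  by_cases hc : d.contains box = true
  · have hswap : ∀ s, (lbl == pvLabel s) = (pvLabel s == lbl) := fun _ => Bool.beq_comm
    simp only [hc, Bool.true_eq_false, if_false, hswap]
    rw [pv_foldl_loop (fun s => pvLabel s == lbl) orig_string]
    simp only [List.nil_append, Bool.false_or]
    by_cases hany : ((d.getD box []).any fun s => pvLabel s == lbl) = true
    · simp only [hany, if_true]
    · simp only [Bool.not_eq_true] at hany
      rw [pv_map_id_of_not_any _ orig_string _ hany]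
      simp only [hany, Bool.false_eq_true, if_false]
  · have hc' : d.contains box = false := Bool.eq_false_iff.mpr hc
    have hg : d.getD box [] = [] := PySem.Dict.getD_of_not_contains d [] hc'
    simp only [hc', if_true, hg, PySem.Dict.getD_insert_self, List.any_nil, List.foldl_nil,
      Bool.false_eq_true, if_false, List.nil_append, PySem.Dict.insert_insert_self]

-- ===== VERDICT (by name: the statement is the Claim_ definition above) =====
theorem do_box_logic_spec : Claim_equal_do_box_logic := by
  intro boxes box orig_string split_string _ _
  unfold Spec_do_box_logic do_box_logic do_box_logic_alt
  by_cases hminus : PySem.Str.isIn "-" orig_string = true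
  · -- remove branch: identical filter on both sides
    simp only [hminus, if_true]
    by_cases hc : (PySem.Dict.mk boxes).contains box = true
    · simp [hc]
    · have hc' : (PySem.Dict.mk boxes).contains box = false := Bool.eq_false_iff.mpr hc
      simp [hc']
  · -- add branch
    simp only [hminus, Bool.false_eq_true, if_false]
    exact pv_add_branch (PySem.Dict.mk boxes) box orig_string
      ((PySem.List.pyGet? split_string 0).getD "")
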